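-- pv_equiv track=rewrite | github.com/dotzo/AdventOfCode2021 | Day03/Day03.py | CO2_mask
-- ===== SOURCE A (Python) =====
-- def CO2_mask(inp):
--     l = len(inp[0])
--     tracker = [0]*len(inp[0])
--     for b in inp:
--         for i in range(len(b)):
--             if b[i] == '0':
--                 tracker[i] -= 1
--             else:
--                 tracker[i] += 1
--
--     return list(map(lambda x: 0 if x >= 0 else 1, tracker))
-- ===== SOURCE B (Python) =====
-- def CO2_mask(inp):
--     l = len(inp[0])
--     cols = [[b[i] for b in inp if i < len(b)] for i in range(l)]
--     return [0 if len(col) - col.count('0') >= col.count('0') else 1 for col in cols]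
-- ===== Notes on version B (the rewrite author's own statement) =====
-- stated objective: idiomatic
-- what changed: B transposes the input and decides each output bit from a per-column '0' count in one comprehension, instead of A's row-by-row walk mutating a running tracker array.
import Mathlib
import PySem

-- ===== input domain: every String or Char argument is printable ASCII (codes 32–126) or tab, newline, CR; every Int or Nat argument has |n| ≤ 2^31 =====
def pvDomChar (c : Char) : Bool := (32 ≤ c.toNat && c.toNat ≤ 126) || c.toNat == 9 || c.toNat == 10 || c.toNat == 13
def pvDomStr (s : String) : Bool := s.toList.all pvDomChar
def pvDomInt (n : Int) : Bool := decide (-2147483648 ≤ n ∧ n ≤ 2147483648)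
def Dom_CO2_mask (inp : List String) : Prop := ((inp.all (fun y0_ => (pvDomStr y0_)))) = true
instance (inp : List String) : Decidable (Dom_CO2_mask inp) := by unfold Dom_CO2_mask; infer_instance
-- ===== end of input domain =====

-- B replaces A's row-by-row tracker mutation by a column-wise count; equivalence is about the return value.

-- ===== PORT A =====
-- b[i] / tracker[i] accesses are ported with the total forms pyGetD/pySetD; Pre_ keeps all indices in range, exactly where Python does not raise.
def CO2_mask (inp : List String) : List Int :=
  let l := (PySem.List.pyGetD inp 0 "").toList.length
  let tracker := List.replicate l (0 : Int)
  let tracker := inp.foldl (fun tr b =>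
    (PySem.List.pyRange 0 (b.toList.length : Int) 1).foldl (fun tr i =>
      if PySem.List.pyGetD b.toList i ' ' = '0' then
        PySem.List.pySetD tr i (PySem.List.pyGetD tr i 0 - 1)
      else
        PySem.List.pySetD tr i (PySem.List.pyGetD tr i 0 + 1)) tr) tracker
  tracker.map (fun x => if x ≥ 0 then (0 : Int) else 1)

-- ===== PORT B =====
def CO2_mask_alt (inp : List String) : List Int :=
  let l := (PySem.List.pyGetD inp 0 "").toList.length
  let cols := (PySem.List.pyRange 0 (l : Int) 1).map (fun i =>
    (inp.filter (fun b => i < (b.toList.length : Int))).map (fun b => PySem.List.pyGetD b.toList i ' '))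
  cols.map (fun col =>
    if (col.length : Int) - PySem.List.count col '0' ≥ PySem.List.count col '0' then (0 : Int) else 1)

-- ===== PRECONDITION & SPEC =====
-- Pre_ excludes exactly the inputs where Python A raises IndexError: empty inp (inp[0]) and
-- a row longer than the first row (tracker[i] out of range).
def Pre_CO2_mask (inp : List String) : Prop :=
  inp ≠ [] ∧ ∀ s ∈ inp, s.toList.length ≤ (inp.headI).toList.length
instance (inp : List String) : Decidable (Pre_CO2_mask inp) := by unfold Pre_CO2_mask; infer_instance
def pvWitness_CO2_mask : List String := (["10", "01"])

def Spec_CO2_mask (inp : List String) (out : List Int) : Prop := out = CO2_mask_alt inp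
instance (inp : List String) (out : List Int) : Decidable (Spec_CO2_mask inp out) := by unfold Spec_CO2_mask; infer_instance

-- ===== CLAIM (what is proved, stated in full; the proofs are below) =====
def Claim_equal_CO2_mask : Prop := ∀ (inp : List String), Dom_CO2_mask inp → Pre_CO2_mask inp → Spec_CO2_mask inp (CO2_mask inp)

-- ===== LEMMAS AND PROOFS =====

def pvCv (c : Char) : Int := if c = '0' then -1 else 1
def pvContrib (b : List Char) (i : Nat) : Int := if i < b.length then pvCv (b.getD i ' ') else 0
def pvColsum (inp : List String) (i : Nat) : Int := (inp.map (fun b => pvContrib b.toList i)).sum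

def pvStep (b : List Char) : List Int → Int → List Int := fun tr i =>
  if PySem.List.pyGetD b i ' ' = '0' then PySem.List.pySetD tr i (PySem.List.pyGetD tr i 0 - 1)
  else PySem.List.pySetD tr i (PySem.List.pyGetD tr i 0 + 1)

lemma pv_set_map_range (l n : Nat) (hn : n < l) (g : Nat → Int) (v : Int) :
    ((List.range l).map g).set n v = (List.range l).map (fun i => if i = n then v else g i) := by
  apply List.ext_getElem (by simp)
  intro i h1 h2
  simp only [List.getElem_set, List.getElem_map, List.getElem_range]
  by_cases h : n = i
  · subst h; simp
  · rw [if_neg h, if_neg (by omega)]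

lemma pv_getD_concat (cs : List Char) (c : Char) :
    (cs ++ [c]).getD cs.length ' ' = c := by
  simp [List.getD]

lemma pv_inner (b : List Char) (l : Nat) (g : Nat → Int) (h : b.length ≤ l) :
    (PySem.List.pyRange 0 (b.length : Int)).foldl (pvStep b) ((List.range l).map g)
      = (List.range l).map (fun i => g i + pvContrib b i) := by
  induction b using List.reverseRecOn generalizing g with
  | nil => simp [pvContrib]
  | append_singleton cs c ih =>
    have hcs : cs.length < l := by simp at h; omega
    have hcast : ((cs ++ [c]).length : Int) = (cs.length : Int) + 1 := by
      simp
    rw [hcast, PySem.List.pyRange_one_succ_right (by positivity), List.foldl_append]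
    have hcongr : (PySem.List.pyRange 0 (cs.length : Int)).foldl (pvStep (cs ++ [c]))
        ((List.range l).map g) = (PySem.List.pyRange 0 (cs.length : Int)).foldl (pvStep cs)
        ((List.range l).map g) := by
      apply PySem.List.foldl_congr_mem
      intro acc x hx
      rw [PySem.List.mem_pyRange_one] at hx
      have hget : PySem.List.pyGetD (cs ++ [c]) x ' ' = PySem.List.pyGetD cs x ' ' := by
        rw [PySem.List.pyGetD_of_nonneg _ _ hx.1, PySem.List.pyGetD_of_nonneg _ _ hx.1,
          List.getD_append _ _ _ _ (by omega)]
      simp only [pvStep, hget]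
    rw [hcongr, ih g (le_of_lt hcs)]
    simp only [List.foldl_cons, List.foldl_nil]
    have hgetc : PySem.List.pyGetD (cs ++ [c]) (cs.length : Int) ' ' = c := by
      rw [PySem.List.pyGetD_natCast, pv_getD_concat]
    have hgetTr : PySem.List.pyGetD ((List.range l).map (fun i => g i + pvContrib cs i)) (cs.length : Int) 0
        = g cs.length + pvContrib cs cs.length := by
      rw [PySem.List.pyGetD_natCast]
      simp [List.getD, hcs]
    have hc0 : pvContrib cs cs.length = 0 := by simp [pvContrib]
    have key : pvStep (cs ++ [c]) ((List.range l).map (fun i => g i + pvContrib cs i)) (cs.length : Int)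
        = ((List.range l).map (fun i => g i + pvContrib cs i)).set cs.length (g cs.length + pvCv c) := by
      by_cases hcc : c = '0'
      · simp only [pvStep, hgetc, if_pos hcc, hgetTr, hc0, add_zero, PySem.List.pySetD_natCast,
          pvCv, sub_eq_add_neg]
      · simp only [pvStep, hgetc, if_neg hcc, hgetTr, hc0, add_zero, PySem.List.pySetD_natCast,
          pvCv]
    rw [key, pv_set_map_range l cs.length hcs]
    apply List.map_congr_left
    intro i hi
    rw [List.mem_range] at hi
    by_cases hin : i = cs.length
    · subst hin
      rw [if_pos rfl, pvContrib, if_pos (by simp), pv_getD_concat]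
    · rw [if_neg hin]
      simp only [pvContrib]
      by_cases h1 : i < cs.length
      · rw [if_pos h1, if_pos (by simp; omega), List.getD_append _ _ _ _ h1]
      · rw [if_neg h1, if_neg (by simp; omega)]

lemma pv_outer (inp : List String) (l : Nat) (g : Nat → Int)
    (h : ∀ s ∈ inp, s.toList.length ≤ l) :
    inp.foldl (fun tr b => (PySem.List.pyRange 0 (b.toList.length : Int)).foldl (pvStep b.toList) tr)
        ((List.range l).map g)
      = (List.range l).map (fun i => g i + pvColsum inp i) := by
  induction inp generalizing g with
  | nil => simp [pvColsum]
  | cons b rest ih =>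
    simp only [List.foldl_cons]
    rw [pv_inner b.toList l g (h b (by simp))]
    rw [ih _ (fun s hs => h s (by simp [hs]))]
    apply List.map_congr_left
    intro i hi
    simp [pvColsum]
    ring

lemma pv_colsum_filter (inp : List String) (i : Nat) :
    pvColsum inp i =
      (((inp.filter (fun b => (i : Int) < (b.toList.length : Int))).map
        (fun b => PySem.List.pyGetD b.toList (i : Int) ' ')).map pvCv).sum := by
  induction inp with
  | nil => simp [pvColsum]
  | cons b rest ih =>
    simp only [pvColsum, List.map_cons, List.sum_cons, List.filter_cons] at *
    by_cases hb : i < b.toList.length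
    · rw [if_pos (by simpa using hb)]
      simp only [List.map_cons, List.sum_cons, ← ih]
      congr 1
      simp only [pvContrib, if_pos hb, PySem.List.pyGetD_natCast]
    · rw [if_neg (by simpa using hb)]
      rw [← ih]
      simp only [pvContrib, if_neg hb, zero_add]

lemma pv_sum_cv (col : List Char) :
    (col.map pvCv).sum = (col.length : Int) - 2 * (List.count '0' col : Int) := by
  induction col with
  | nil => simp
  | cons c cs ih =>
    simp only [List.map_cons, List.sum_cons, ih, List.count_cons, List.length_cons]
    by_cases hc : c = '0'
    · simp [pvCv, hc]; push_cast; ring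
    · simp [pvCv, hc]; push_cast; ring

lemma pv_outer_lam (inp : List String) (l : Nat)
    (h : ∀ s ∈ inp, s.toList.length ≤ l) :
    inp.foldl (fun tr b =>
      (PySem.List.pyRange 0 (b.toList.length : Int)).foldl (fun tr i =>
        if PySem.List.pyGetD b.toList i ' ' = '0' then
          PySem.List.pySetD tr i (PySem.List.pyGetD tr i 0 - 1)
        else
          PySem.List.pySetD tr i (PySem.List.pyGetD tr i 0 + 1)) tr)
      (List.replicate l (0 : Int))
      = (List.range l).map (fun i => pvColsum inp i) := by
  have hrep : List.replicate l (0 : Int) = (List.range l).map (fun _ => (0 : Int)) := by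
    simp [List.map_const']
  rw [hrep]
  have h2 : (List.range l).map (fun i => (0 : Int) + pvColsum inp i)
      = (List.range l).map (fun i => pvColsum inp i) := by simp
  exact (pv_outer inp l (fun _ => (0 : Int)) h).trans h2

-- ===== VERDICT (by name: the statement is the Claim_ definition above) =====
theorem CO2_mask_spec : Claim_equal_CO2_mask := by
  intro inp _ hpre
  obtain ⟨hne, hall⟩ := hpre
  obtain ⟨b0, rest, rfl⟩ : ∃ b0 rest, inp = b0 :: rest := by
    cases inp with
    | nil => exact absurd rfl hne
    | cons x xs => exact ⟨x, xs, rfl⟩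
  unfold Spec_CO2_mask CO2_mask CO2_mask_alt
  simp only [PySem.List.pyGetD_zero_cons]
  rw [pv_outer_lam (b0 :: rest) b0.toList.length (by simpa using hall)]
  rw [PySem.List.pyRange_zero_nat, List.map_map, List.map_map, List.map_map]
  apply List.map_congr_left
  intro i hi
  rw [List.mem_range] at hi
  simp only [Function.comp]
  set col := ((b0 :: rest).filter (fun b => (i : Int) < (b.toList.length : Int))).map
    (fun b => PySem.List.pyGetD b.toList (i : Int) ' ') with hcol
  have hcs : pvColsum (b0 :: rest) i = (col.length : Int) - 2 * (List.count '0' col : Int) := by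
    rw [pv_colsum_filter (b0 :: rest) i, ← hcol, pv_sum_cv col]
  simp only [PySem.List.count_eq]
  simp only [← hcol]
  by_cases hc : pvColsum (b0 :: rest) i ≥ 0
  · rw [if_pos hc, if_pos (by omega)]
  · rw [if_neg hc, if_neg (by omega)]
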